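-- pv_equiv track=rewrite | github.com/iai-group/sigir2017-table | Population/column_evaluation.py | parse
-- ===== SOURCE A (Python) =====
-- def parse(text):
--     """Put query into a term list for term iteration"""
--     stopwords = []
--     terms = []
--     # Replace specific characters with space
--     chars = ["'", ".", ":", ",", "/", "(", ")", "-", "+"]
--     for ch in chars:
--         if ch in text:
--             text = text.replace(ch, " ")
--     # Tokenization
--     for term in text.split():  # default behavior of the split is to split on one or more whitespaces
--         # Stopword removal
--         if term in stopwords:
--             continue
--         terms.append(term)
--     return terms
-- ===== SOURCE B (Python) =====
-- def parse(text):
--     """Put query into a term list for term iteration"""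
--     delims = set("'.:,/()-+")
--     terms = []
--     buf = []
--     for ch in text:
--         if ch in delims or ch.isspace():
--             if buf:
--                 terms.append(''.join(buf))
--                 buf = []
--         else:
--             buf.append(ch)
--     if buf:
--         terms.append(''.join(buf))
--     return terms
-- ===== Notes on version B (the rewrite author's own statement) =====
-- stated objective: alternative
-- what changed: B replaces A's nine whole-string replace passes followed by split() with one single forward pass over the characters that flushes a token buffer at every punctuation or whitespace character.
import Mathlib
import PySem

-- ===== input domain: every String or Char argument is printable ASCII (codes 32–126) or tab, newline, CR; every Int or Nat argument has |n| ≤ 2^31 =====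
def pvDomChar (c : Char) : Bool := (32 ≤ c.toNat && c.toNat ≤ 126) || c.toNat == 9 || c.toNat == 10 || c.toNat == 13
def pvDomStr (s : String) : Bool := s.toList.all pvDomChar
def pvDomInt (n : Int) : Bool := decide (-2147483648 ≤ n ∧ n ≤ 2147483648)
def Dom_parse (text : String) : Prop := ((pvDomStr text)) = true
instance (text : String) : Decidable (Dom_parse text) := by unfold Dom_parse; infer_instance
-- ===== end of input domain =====

-- B tokenizes in one forward pass with a token buffer instead of A's nine whole-string replace passes followed by split(); same return value.

-- ===== PORT A =====
def parse (text : String) : List String :=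
  let stopwords : List String := []
  let chars : List String := ["'", ".", ":", ",", "/", "(", ")", "-", "+"]
  let text := chars.foldl (fun t ch => if PySem.Str.isIn ch t then PySem.Str.replace t ch " " else t) text
  (PySem.Str.split₀ text).foldl (fun terms term => if term ∈ stopwords then terms else terms ++ [term]) []

-- ===== PORT B =====
def pvDelims : PySem.Set Char := PySem.Set.ofList "'.:,/()-+".toList

def parseAltStep (st : List String × List Char) (ch : Char) : List String × List Char :=
  if ch ∈ pvDelims ∨ PySem.Chars.isspace ch then
    if st.2.isEmpty then (st.1, []) else (st.1 ++ [String.ofList st.2], [])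
  else (st.1, st.2 ++ [ch])

def parse_alt (text : String) : List String :=
  let st := text.toList.foldl parseAltStep ([], [])
  if st.2.isEmpty then st.1 else st.1 ++ [String.ofList st.2]

-- ===== PRECONDITION & SPEC =====
def Spec_parse (text : String) (out : List String) : Prop := out = parse_alt text
instance (text : String) (out : List String) : Decidable (Spec_parse text out) := by unfold Spec_parse; infer_instance

-- ===== CLAIM (what is proved, stated in full; the proofs are below) =====
def Claim_equal_parse : Prop := ∀ (text : String), Dom_parse text → Spec_parse text (parse text)

-- ===== LEMMAS AND PROOFS =====

-- the character substitution that A's nine conditional replace passes amount to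
def pvF (c : Char) : Char := if c ∈ pvDelims then ' ' else c

-- the token list produced from the rest of the input given the current buffer
def pvTok : List Char → List Char → List (List Char)
  | [], buf => if buf.isEmpty then [] else [buf]
  | c :: t, buf =>
    if c ∈ pvDelims ∨ PySem.Chars.isspace c then
      (if buf.isEmpty then pvTok t [] else buf :: pvTok t []) else pvTok t (buf ++ [c])

lemma replace_go_single (c : Char) :
    ∀ (l : List Char) (fuel : Nat) (acc : List Char), l.length ≤ fuel →
      PySem.Chars.replace.go [c] [' '] fuel l acc
        = acc.reverse ++ l.map (fun ch => if ch = c then ' ' else ch) := by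
  intro l
  induction l with
  | nil =>
    intro fuel acc _
    cases fuel <;> simp [PySem.Chars.replace.go]
  | cons ch t ih =>
    intro fuel acc hle
    cases fuel with
    | zero => simp at hle
    | succ n =>
      have hlen : t.length ≤ n := by simpa using hle
      by_cases hc : ch = c
      · subst hc
        have hpre : List.isPrefixOf [ch] (ch :: t) = true := by
          simp [List.isPrefixOf]
        simp only [PySem.Chars.replace.go, hpre, if_pos]
        rw [show List.drop [ch].length (ch :: t) = t from rfl,
            show [' '].reverse ++ acc = ' ' :: acc from rfl, ih n (' ' :: acc) hlen]
        simp
      · have hpre : List.isPrefixOf [c] (ch :: t) = false := by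
          simp [List.isPrefixOf]; exact fun h => hc h.symm
        simp only [PySem.Chars.replace.go, hpre, Bool.false_eq_true, if_false]
        rw [ih n (ch :: acc) hlen]
        simp [hc]

lemma repl_one (t : List Char) (c : Char) :
    (if PySem.Chars.isIn [c] t then PySem.Chars.replace t [c] [' '] else t)
      = t.map (fun ch => if ch = c then ' ' else ch) := by
  by_cases h : PySem.Chars.isIn [c] t = true
  · rw [if_pos h]
    simp only [PySem.Chars.replace]
    rw [replace_go_single c t t.length [] le_rfl]
    simp
  · rw [if_neg (by simp [h])]
    have hmem : c ∉ t := by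
      intro hm
      exact h ((PySem.Chars.isIn_iff_infix [c] t).mpr ((List.singleton_infix_iff c t).mpr hm))
    refine ((List.map_congr_left fun x hx => ?_).trans (List.map_id t)).symm
    exact if_neg (fun he : x = c => hmem (he ▸ hx))

lemma strStep_toList (t s : String) (c : Char) (h : s.toList = [c]) :
    (if PySem.Str.isIn s t then PySem.Str.replace t s " " else t).toList
      = t.toList.map (fun ch => if ch = c then ' ' else ch) := by
  have h2 := repl_one t.toList c
  simp only [PySem.Str.isIn, PySem.Str.replace, h, show (" " : String).toList = [' '] from rfl] at *
  split_ifs at h2 ⊢ with hc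
  · rw [← h2]; simp
  · exact h2

lemma isspace_pvF (c : Char) :
    PySem.Chars.isspace (pvF c) = (decide (c ∈ pvDelims) || PySem.Chars.isspace c) := by
  by_cases h : c ∈ pvDelims
  · have : PySem.Chars.isspace ' ' = true := rfl
    simp [pvF, h, this]
  · simp [pvF, h]

lemma fold_maps (cs : List Char) (h : ' ' ∉ cs) : ∀ t : String,
    ((cs.map (fun c => String.ofList [c])).foldl
        (fun t ch => if PySem.Str.isIn ch t then PySem.Str.replace t ch " " else t) t).toList
      = t.toList.map (fun ch => if ch ∈ cs then ' ' else ch) := by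
  induction cs with
  | nil => intro t; simp
  | cons c cs ih =>
    intro t
    have hsp : ' ' ∉ cs := fun hm => h (List.mem_cons_of_mem c hm)
    simp only [List.map_cons, List.foldl_cons]
    rw [ih hsp]
    rw [strStep_toList t (String.ofList [c]) c (by simp)]
    rw [List.map_map]
    refine List.map_congr_left fun x _ => ?_
    by_cases hx : x = c
    · subst hx
      simp [List.mem_cons, hsp]
    · simp only [Function.comp_apply, if_neg hx, List.mem_cons]
      by_cases hxc : x ∈ cs <;> simp [hx, hxc]

lemma split_go_map : ∀ (l cur : List Char) (acc : List (List Char)),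
    PySem.Chars.split₀.go (l.map pvF) cur acc = acc.reverse ++ pvTok l cur.reverse := by
  intro l
  induction l with
  | nil =>
    intro cur acc
    simp only [List.map_nil, PySem.Chars.split₀.go, pvTok, List.isEmpty_reverse]
    by_cases hc : cur.isEmpty <;> simp [hc]
  | cons c t ih =>
    intro cur acc
    simp only [List.map_cons, PySem.Chars.split₀.go, pvTok, isspace_pvF]
    by_cases hd : c ∈ pvDelims ∨ PySem.Chars.isspace c = true
    · have hb : (decide (c ∈ pvDelims) || PySem.Chars.isspace c) = true := by
        rcases hd with hd | hd <;> simp [hd]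
      rw [if_pos hb, if_pos hd]
      by_cases hc : cur.isEmpty
      · have : cur = [] := by simpa using hc
        subst this
        rw [ih [] acc]
        simp
      · rw [if_neg (by simpa using hc), if_neg (by simpa [List.isEmpty_reverse] using hc)]
        rw [ih [] (cur.reverse :: acc)]
        simp
    · have hb : (decide (c ∈ pvDelims) || PySem.Chars.isspace c) = false := by
        push Not at hd
        simp [hd.1, hd.2]
      have hpv : pvF c = c := if_neg (fun hm => hd (Or.inl hm))
      rw [if_neg (by simp [hb]), if_neg hd, hpv, ih (c :: cur) acc]
      simp

lemma foldl_tok : ∀ (l : List Char) (terms : List String) (buf : List Char),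
    (if (l.foldl parseAltStep (terms, buf)).2.isEmpty then (l.foldl parseAltStep (terms, buf)).1
     else (l.foldl parseAltStep (terms, buf)).1 ++ [String.ofList (l.foldl parseAltStep (terms, buf)).2])
      = terms ++ (pvTok l buf).map String.ofList := by
  intro l
  induction l with
  | nil =>
    intro terms buf
    simp only [List.foldl_nil, pvTok]
    by_cases hb : buf.isEmpty <;> simp [hb]
  | cons c t ih =>
    intro terms buf
    simp only [List.foldl_cons, parseAltStep, pvTok]
    by_cases hd : c ∈ pvDelims ∨ PySem.Chars.isspace c = true
    · rw [if_pos hd, if_pos hd]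
      by_cases hb : buf.isEmpty
      · rw [if_pos hb, if_pos hb, ih terms []]
      · rw [if_neg hb, if_neg hb, ih (terms ++ [String.ofList buf]) []]
        simp
    · rw [if_neg hd, if_neg hd, ih terms (buf ++ [c])]

lemma pvDelims_eq : pvDelims = ['\'', '.', ':', ',', '/', '(', ')', '-', '+'] := by decide

lemma stop_fold (L : List String) :
    L.foldl (fun terms term => if term ∈ ([] : List String) then terms else terms ++ [term]) [] = L := by
  simp only [List.not_mem_nil, if_false]
  exact PySem.List.foldl_append_singleton L []

-- ===== VERDICT (by name: the statement is the Claim_ definition above) =====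
theorem parse_spec : Claim_equal_parse := by
  intro text _
  show parse text = parse_alt text
  rw [parse, parse_alt]
  show (PySem.Str.split₀ _).foldl _ [] = _
  rw [stop_fold]
  have hlist : (["'", ".", ":", ",", "/", "(", ")", "-", "+"] : List String)
      = (['\'', '.', ':', ',', '/', '(', ')', '-', '+'].map fun c => String.ofList [c]) := rfl
  have hmap : ((["'", ".", ":", ",", "/", "(", ")", "-", "+"] : List String).foldl
      (fun t ch => if PySem.Str.isIn ch t then PySem.Str.replace t ch " " else t) text).toList
      = text.toList.map pvF := by
    rw [hlist, fold_maps _ (by decide) text]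
    refine List.map_congr_left fun x _ => ?_
    rw [pvF, pvDelims_eq]
  rw [PySem.Str.split₀, hmap]
  rw [PySem.Chars.split₀, split_go_map text.toList [] []]
  rw [foldl_tok text.toList [] []]
  simp
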